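-- pv_equiv track=rewrite | github.com/igor-bbb/bon-buasson-bridge | app/query/parsing.py | _dedupe_periods
-- ===== SOURCE A (Python) =====
-- from typing import Any, Dict, List, Optional, Tuple
--
-- def _dedupe_periods(found: List[Tuple[int, str]]) -> List[Tuple[int, str]]:
--     unique: List[Tuple[int, str]] = []
--     seen = set()
--     for position, period in sorted(found, key=lambda x: x[0]):
--         if period in seen:
--             continue
--         seen.add(period)
--         unique.append((position, period))
--     return unique
-- ===== SOURCE B (Python) =====
-- from typing import List, Tuple
--
-- def _dedupe_periods(found: List[Tuple[int, str]]) -> List[Tuple[int, str]]: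
--     # One pass: keep, per period, the entry with the smallest position
--     # (earliest original index on ties); then sort only the reduced set.
--     best = {}
--     for i, (pos, per) in enumerate(found):
--         cur = best.get(per)
--         if cur is None or pos < cur[0]:
--             best[per] = (pos, i)
--     reps = sorted(best.items(), key=lambda kv: (kv[1][0], kv[1][1]))
--     return [(pos, per) for per, (pos, _i) in reps]
-- ===== Notes on version B (the rewrite author's own statement) =====
-- stated objective: alternative
-- what changed: Instead of sorting the whole input and scanning it with a seen-set, B makes one pass building a per-period minimum (position, index) representative and sorts only the reduced set of representatives.
import Mathlib
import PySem

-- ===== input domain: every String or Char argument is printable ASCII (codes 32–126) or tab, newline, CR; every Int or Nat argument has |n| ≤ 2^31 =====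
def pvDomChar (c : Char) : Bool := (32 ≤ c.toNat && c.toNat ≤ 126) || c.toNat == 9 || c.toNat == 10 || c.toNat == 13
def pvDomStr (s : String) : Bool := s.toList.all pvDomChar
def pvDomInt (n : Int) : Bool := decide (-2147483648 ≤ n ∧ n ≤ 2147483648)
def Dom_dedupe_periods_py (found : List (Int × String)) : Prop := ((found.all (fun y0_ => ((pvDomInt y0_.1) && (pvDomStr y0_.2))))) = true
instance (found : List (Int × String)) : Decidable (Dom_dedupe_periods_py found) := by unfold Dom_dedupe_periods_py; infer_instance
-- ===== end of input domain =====

-- B replaces A's sort-everything-then-scan-with-a-seen-set by a single pass that keeps,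
-- per period, the minimum-position entry (earliest index on ties) and sorts only the
-- reduced set: an alternative decomposition, equal return value (no argument is mutated).

-- ===== PORT A =====
-- for position, period in sorted(found, key=lambda x: x[0]): if period in seen: continue; seen.add(period); unique.append(...)
def dedupe_periods_py (found : List (Int × String)) : List (Int × String) :=
  ((PySem.List.sorted found (fun x => x.1)).foldl
    (fun (st : List (Int × String) × PySem.Set String) ps =>
      if PySem.Set.contains st.2 ps.2 then st
      else (st.1 ++ [ps], PySem.Set.add st.2 ps.2))
    ([], PySem.Set.empty)).1

-- ===== PORT B =====
-- best = {}; for i,(pos,per) in enumerate(found): cur = best.get(per); if cur is None or pos < cur[0]: best[per] = (pos,i)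
-- reps = sorted(best.items(), key=lambda kv: (kv[1][0], kv[1][1])); return [(pos, per) for per,(pos,_i) in reps]
def dedupe_periods_py_alt (found : List (Int × String)) : List (Int × String) :=
  let best : PySem.Dict String (Int × Int) :=
    (PySem.List.enumerate found 0).foldl
      (fun d e =>
        match d.get? e.2.2 with
        | none => d.insert e.2.2 (e.2.1, e.1)
        | some cur => if e.2.1 < cur.1 then d.insert e.2.2 (e.2.1, e.1) else d)
      PySem.Dict.empty
  let reps := PySem.List.sorted2 best.items (fun kv => kv.2.1) (fun kv => kv.2.2)
  reps.map (fun kv => (kv.2.1, kv.1))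

-- ===== PRECONDITION & SPEC =====
def Spec_dedupe_periods_py (found : List (Int × String)) (out : List (Int × String)) : Prop := out = dedupe_periods_py_alt found
instance (found : List (Int × String)) (out : List (Int × String)) : Decidable (Spec_dedupe_periods_py found out) := by unfold Spec_dedupe_periods_py; infer_instance

-- ===== CLAIM (what is proved, stated in full; the proofs are below) =====
def Claim_equal_dedupe_periods_py : Prop := ∀ (found : List (Int × String)), Dom_dedupe_periods_py found → Spec_dedupe_periods_py found (dedupe_periods_py found)

-- ===== LEMMAS AND PROOFS =====

def pvKey (e : Int × (Int × String)) : Lex (Int × Int) := toLex (e.2.1, e.1)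
def pvE (found : List (Int × String)) : List (Int × (Int × String)) :=
  PySem.List.enumerate found 0
def pvSL (found : List (Int × String)) : List (Int × (Int × String)) :=
  PySem.List.sorted2 (pvE found) (fun e => e.2.1) (fun e => e.1)
def pvIsMin (found : List (Int × String)) (e : Int × (Int × String)) : Bool :=
  (pvE found).all (fun e' => !(e'.2.2 == e.2.2) || decide (pvKey e ≤ pvKey e'))
def pvDed (seen : PySem.Set String) : List (Int × String) → List (Int × String)
  | [] => []
  | ps :: t =>
    if PySem.Set.contains seen ps.2 then pvDed seen t
    else ps :: pvDed (PySem.Set.add seen ps.2) t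
lemma pv_sorted2_eq_sorted_lex {α : Type} (xs : List α) (k1 k2 : α → Int) :
    PySem.List.sorted2 xs k1 k2 = PySem.List.sorted xs (fun a => toLex (k1 a, k2 a)) := by
  show xs.foldl _ [] = xs.foldl _ []
  congr 1
  funext acc x
  congr 1
  funext a b
  simp only [if_neg (by decide : ¬ (false = true))]
  by_cases h1 : k1 a < k1 b <;> by_cases h2 : k1 b < k1 a <;> by_cases h3 : k2 a < k2 b <;>
    simp [h1, h2, h3, Prod.Lex.lt_iff] <;> omega

lemma pv_foldA (l : List (Int × String)) (u : List (Int × String)) (seen : PySem.Set String) :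
    (l.foldl
      (fun (st : List (Int × String) × PySem.Set String) ps =>
        if PySem.Set.contains st.2 ps.2 then st
        else (st.1 ++ [ps], PySem.Set.add st.2 ps.2))
      (u, seen)).1 = u ++ pvDed seen l := by
  induction l generalizing u seen with
  | nil => simp [pvDed]
  | cons ps t ih =>
    simp only [List.foldl_cons, pvDed]
    by_cases h : PySem.Set.contains seen ps.2
    · rw [if_pos h, if_pos h]
      exact ih u seen
    · rw [if_neg h, if_neg h, ih (u ++ [ps]) (PySem.Set.add seen ps.2)]
      simp

lemma pv_isMin_iff (found : List (Int × String)) (e : Int × (Int × String)) :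
    pvIsMin found e = true ↔ ∀ e' ∈ pvE found, e'.2.2 = e.2.2 → pvKey e ≤ pvKey e' := by
  simp [pvIsMin, List.all_eq_true, or_iff_not_imp_left]

lemma pv_SL_perm (found : List (Int × String)) : (pvSL found).Perm (pvE found) :=
  PySem.List.sorted2_perm _ _ _ _

lemma pv_SL_pairwise (found : List (Int × String)) :
    (pvSL found).Pairwise (fun a b => pvKey a < pvKey b) := by
  have hle : (pvSL found).Pairwise (fun a b => pvKey a ≤ pvKey b) := by
    have := PySem.List.sorted_pairwise (pvE found) (fun e => toLex (e.2.1, e.1))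
    unfold pvSL
    rw [pv_sorted2_eq_sorted_lex]
    exact this
  have hne : (pvSL found).Pairwise (fun a b => a.1 ≠ b.1) := by
    have hE : (pvE found).Pairwise (fun a b => a.1 ≠ b.1) :=
      (PySem.List.pairwise_lt_enumerate found 0).imp (fun h => ne_of_lt h)
    exact ((pv_SL_perm found).pairwise_iff (fun h => Ne.symm h)).mpr hE
  exact (hle.and hne).imp (fun h => lt_of_le_of_ne h.1
    (fun heq => h.2 (congrArg (fun k => (ofLex k).2) heq)))

def pvDstep (d : PySem.Dict String (Int × Int)) (e : Int × (Int × String)) :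
    PySem.Dict String (Int × Int) :=
  match d.get? e.2.2 with
  | none => d.insert e.2.2 (e.2.1, e.1)
  | some cur => if e.2.1 < cur.1 then d.insert e.2.2 (e.2.1, e.1) else d

def pvOstep (s : String) (o : Option (Int × Int)) (e : Int × (Int × String)) :
    Option (Int × Int) :=
  if e.2.2 = s then
    match o with
    | none => some (e.2.1, e.1)
    | some c => if e.2.1 < c.1 then some (e.2.1, e.1) else some c
  else o

lemma pv_get?_fold (l : List (Int × (Int × String))) (d : PySem.Dict String (Int × Int))
    (s : String) : (l.foldl pvDstep d).get? s = l.foldl (pvOstep s) (d.get? s) := by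
  induction l generalizing d with
  | nil => rfl
  | cons e t ih =>
    simp only [List.foldl_cons]
    rw [ih]
    congr 1
    by_cases hs : e.2.2 = s
    · subst hs
      unfold pvDstep pvOstep
      cases h : d.get? e.2.2 with
      | none => simp [h, PySem.Dict.get?_insert]
      | some c =>
        by_cases hc : e.2.1 < c.1
        · simp [h, hc, PySem.Dict.get?_insert]
        · simp [h, hc]
    · unfold pvDstep pvOstep
      cases h : d.get? e.2.2 with
      | none => simp [hs, PySem.Dict.get?_insert, Ne.symm hs]
      | some c =>
        by_cases hc : e.2.1 < c.1
        · simp [hs, hc, PySem.Dict.get?_insert, Ne.symm hs]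
        · simp [hs, hc]

lemma pv_nodup_fold (l : List (Int × (Int × String))) (d : PySem.Dict String (Int × Int))
    (hd : d.keys.Nodup) : (l.foldl pvDstep d).keys.Nodup := by
  induction l generalizing d with
  | nil => exact hd
  | cons e t ih =>
    simp only [List.foldl_cons]
    apply ih
    unfold pvDstep
    cases d.get? e.2.2 with
    | none => exact PySem.Dict.nodup_keys_insert _ _ _ hd
    | some c =>
      by_cases hc : e.2.1 < c.1
      · simp only [if_pos hc]; exact PySem.Dict.nodup_keys_insert _ _ _ hd
      · simp only [if_neg hc]; exact hd

lemma pv_mem_SL_idx_lt (found : List (Int × String)) (e : Int × (Int × String))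
    (he : e ∈ pvSL found) : 0 ≤ e.1 ∧ e.1 < (found.length : Int) := by
  have hmem : e ∈ pvE found := (pv_SL_perm found).mem_iff.mp he
  rw [pvE, PySem.List.mem_enumerate_iff] at hmem
  obtain ⟨k, hk, rfl⟩ := hmem
  constructor <;> simp <;> omega

lemma pv_map_snd_insertBy (x : Int × String) (n : Int) (S : List (Int × (Int × String)))
    (h : ∀ e ∈ S, e.1 < n) :
    (PySem.List.insertBy (fun a b => decide (pvKey a < pvKey b)) (n, x) S).map (fun e => e.2)
      = PySem.List.insertBy (fun a b => decide (a.1 < b.1)) x (S.map (fun e => e.2)) := by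
  induction S with
  | nil => rfl
  | cons y t ih =>
    have hy : y.1 < n := h y (by simp)
    have hcond : (decide (pvKey (n, x) < pvKey y)) = decide (x.1 < y.2.1) := by
      simp only [pvKey, Prod.Lex.lt_iff, ofLex_toLex]
      by_cases hc : x.1 < y.2.1 <;> simp [hc] <;> omega
    simp only [PySem.List.insertBy, hcond]
    by_cases hc : x.1 < y.2.1
    · simp [PySem.List.insertBy, hc]
    · simp only [hc, decide_false, Bool.false_eq_true, if_false, List.map_cons]
      rw [ih (fun e he => h e (by simp [he]))]
      simp [PySem.List.insertBy, hc]

lemma pv_stab (found : List (Int × String)) :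
    (pvSL found).map (fun e => e.2) = PySem.List.sorted found (fun x => x.1) := by
  induction found using List.reverseRecOn with
  | nil => rfl
  | append_singleton xs x ih =>
    have hR : PySem.List.sorted (xs ++ [x]) (fun p => p.1)
        = PySem.List.insertBy (fun a b => decide (a.1 < b.1)) x
            (PySem.List.sorted xs (fun p => p.1)) := by
      rw [PySem.List.sorted_eq_foldl_insertBy, List.foldl_append,
        ← PySem.List.sorted_eq_foldl_insertBy]
      rfl
    have hL : pvSL (xs ++ [x])
        = PySem.List.insertBy (fun a b => decide (pvKey a < pvKey b))
            (((xs.length : Int)), x) (pvSL xs) := by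
      unfold pvSL pvE
      rw [pv_sorted2_eq_sorted_lex, pv_sorted2_eq_sorted_lex,
        PySem.List.enumerate_append]
      rw [PySem.List.sorted_eq_foldl_insertBy, List.foldl_append,
        ← PySem.List.sorted_eq_foldl_insertBy]
      simp only [PySem.List.enumerate_cons, PySem.List.enumerate_nil, pvKey]
      norm_num
      rfl
    rw [hR, hL, ← ih]
    exact pv_map_snd_insertBy x (xs.length : Int) (pvSL xs)
      (fun e he => (pv_mem_SL_idx_lt xs e he).2)

lemma pvOstep_none (s : String) (e : Int × (Int × String)) (hs : e.2.2 = s) :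
    pvOstep s none e = some (e.2.1, e.1) := by simp [pvOstep, hs]

lemma pvOstep_some_lt (s : String) (e : Int × (Int × String)) (c : Int × Int)
    (hs : e.2.2 = s) (hlt : e.2.1 < c.1) : pvOstep s (some c) e = some (e.2.1, e.1) := by
  simp [pvOstep, hs, hlt]

lemma pvOstep_some_ge (s : String) (e : Int × (Int × String)) (c : Int × Int)
    (hs : e.2.2 = s) (hlt : ¬ e.2.1 < c.1) : pvOstep s (some c) e = some c := by
  simp [pvOstep, hs, hlt]

lemma pvOstep_other (s : String) (e : Int × (Int × String)) (o : Option (Int × Int))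
    (hs : ¬ e.2.2 = s) : pvOstep s o e = o := by simp [pvOstep, hs]

lemma pv_ofold_gen (s : String) (l : List (Int × (Int × String))) (o : Option (Int × Int))
    (hp : l.Pairwise (fun a b => a.1 < b.1))
    (ho : ∀ c, o = some c → ∀ e ∈ l, c.2 < e.1) :
    ((l.foldl (pvOstep s) o = o ∨
        ∃ e ∈ l, e.2.2 = s ∧ l.foldl (pvOstep s) o = some (e.2.1, e.1)) ∧
      (∀ e ∈ l, e.2.2 = s → ∃ c, l.foldl (pvOstep s) o = some c ∧
        (c.1 < e.2.1 ∨ (c.1 = e.2.1 ∧ c.2 ≤ e.1))) ∧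
      (∀ c, o = some c → ∃ c', l.foldl (pvOstep s) o = some c' ∧ (c'.1 < c.1 ∨ c' = c))) := by
  induction l generalizing o with
  | nil => exact ⟨Or.inl rfl, by simp, fun c hc => ⟨c, by simp [hc], Or.inr rfl⟩⟩
  | cons e t ih =>
    have hpt : t.Pairwise (fun a b => a.1 < b.1) := hp.of_cons
    have hhead : ∀ e' ∈ t, e.1 < e'.1 := (List.pairwise_cons.mp hp).1
    have ho' : ∀ c, pvOstep s o e = some c → ∀ e' ∈ t, c.2 < e'.1 := by
      intro c hc e' he'
      by_cases hs : e.2.2 = s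
      · cases h : o with
        | none =>
          rw [h, pvOstep_none s e hs] at hc
          cases hc
          exact hhead e' he'
        | some c0 =>
          by_cases hlt : e.2.1 < c0.1
          · rw [h, pvOstep_some_lt s e c0 hs hlt] at hc
            cases hc
            exact hhead e' he'
          · rw [h, pvOstep_some_ge s e c0 hs hlt] at hc
            cases hc
            exact lt_trans (ho _ h e (by simp)) (hhead e' he')
      · rw [pvOstep_other s e o hs] at hc
        exact lt_trans (ho c hc e (by simp)) (hhead e' he')
    obtain ⟨ih1, ih2, ih3⟩ := ih (pvOstep s o e) hpt ho'
    simp only [List.foldl_cons]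
    refine ⟨?_, ?_, ?_⟩
    · -- provenance
      by_cases hs : e.2.2 = s
      · rcases ih1 with h | ⟨e', he', hs', hr⟩
        · rw [h]
          cases h0 : o with
          | none => exact Or.inr ⟨e, by simp, hs, pvOstep_none s e hs⟩
          | some c0 =>
            by_cases hlt : e.2.1 < c0.1
            · exact Or.inr ⟨e, by simp, hs, pvOstep_some_lt s e c0 hs hlt⟩
            · exact Or.inl (pvOstep_some_ge s e c0 hs hlt)
        · exact Or.inr ⟨e', by simp [he'], hs', hr⟩
      · rcases ih1 with h | ⟨e', he', hs', hr⟩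
        · rw [h, pvOstep_other s e o hs]
          exact Or.inl rfl
        · exact Or.inr ⟨e', by simp [he'], hs', hr⟩
    · -- minimality
      intro e' he' hs'
      rcases List.mem_cons.mp he' with rfl | he't
      · have hsome : ∃ c0, pvOstep s o e' = some c0 ∧
            (c0.1 < e'.2.1 ∨ (c0.1 = e'.2.1 ∧ c0.2 ≤ e'.1)) := by
          cases h0 : o with
          | none => exact ⟨(e'.2.1, e'.1), pvOstep_none s e' hs', Or.inr ⟨rfl, le_refl _⟩⟩
          | some c0 =>
            by_cases hlt : e'.2.1 < c0.1
            · exact ⟨(e'.2.1, e'.1), pvOstep_some_lt s e' c0 hs' hlt, Or.inr ⟨rfl, le_refl _⟩⟩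
            · refine ⟨c0, pvOstep_some_ge s e' c0 hs' hlt, ?_⟩
              have : c0.2 < e'.1 := ho c0 h0 e' (by simp)
              rcases lt_or_eq_of_le (le_of_not_gt hlt) with h | h
              · exact Or.inl h
              · exact Or.inr ⟨h, le_of_lt this⟩
        obtain ⟨c0, hc0, hle0⟩ := hsome
        obtain ⟨c', hc', hle'⟩ := ih3 c0 hc0
        refine ⟨c', hc', ?_⟩
        rcases hle' with h | rfl
        · rcases hle0 with h0 | ⟨h0, _⟩
          · exact Or.inl (lt_trans h h0)
          · exact Or.inl (h0 ▸ h)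
        · exact hle0
      · exact ih2 e' he't hs'
    · -- improvement over o
      intro c hc
      have hstep : ∃ c0, pvOstep s o e = some c0 ∧ (c0.1 < c.1 ∨ c0 = c) := by
        by_cases hs : e.2.2 = s
        · by_cases hlt : e.2.1 < c.1
          · exact ⟨(e.2.1, e.1), hc ▸ pvOstep_some_lt s e c hs hlt, Or.inl hlt⟩
          · exact ⟨c, hc ▸ pvOstep_some_ge s e c hs hlt, Or.inr rfl⟩
        · exact ⟨c, hc ▸ pvOstep_other s e (some c) hs, Or.inr rfl⟩
      obtain ⟨c0, hc0, hle0⟩ := hstep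
      obtain ⟨c', hc', hle'⟩ := ih3 c0 hc0
      refine ⟨c', hc', ?_⟩
      rcases hle' with h | rfl
      · rcases hle0 with h0 | rfl
        · exact Or.inl (lt_trans h h0)
        · exact Or.inl h
      · exact hle0

def pvMinProp (found : List (Int × String)) (s : String) (v : Int × Int) : Prop :=
  (v.2, (v.1, s)) ∈ pvE found ∧
    ∀ e ∈ pvE found, e.2.2 = s → pvKey (v.2, (v.1, s)) ≤ pvKey e

lemma pv_ofold_forward (found : List (Int × String)) (s : String) (v : Int × Int)
    (h : (pvE found).foldl (pvOstep s) none = some v) : pvMinProp found s v := by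
  obtain ⟨h1, h2, -⟩ := pv_ofold_gen s (pvE found) none
    (PySem.List.pairwise_lt_enumerate found 0) (by simp)
  rcases h1 with h1 | ⟨e, he, hs, hr⟩
  · rw [h] at h1; cases h1
  · rw [h] at hr
    injection hr with hr
    subst hr
    constructor
    · show (e.1, (e.2.1, s)) ∈ pvE found
      rw [← hs]
      exact (show (e.1, (e.2.1, e.2.2)) = e from rfl) ▸ he
    · intro e' he' hs'
      obtain ⟨c, hc, hle⟩ := h2 e' he' hs'
      rw [h] at hc
      injection hc with hc
      subst hc
      show toLex (e.2.1, e.1) ≤ toLex (e'.2.1, e'.1)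
      rw [Prod.Lex.le_iff]
      simpa using hle

lemma pv_final_char (found : List (Int × String)) (s : String) (v : Int × Int) :
    ((pvE found).foldl pvDstep PySem.Dict.empty).get? s = some v ↔ pvMinProp found s v := by
  rw [pv_get?_fold, PySem.Dict.get?_empty]
  constructor
  · exact pv_ofold_forward found s v
  · rintro ⟨hmem, hmin⟩
    obtain ⟨-, h2, -⟩ := pv_ofold_gen s (pvE found) none
      (PySem.List.pairwise_lt_enumerate found 0) (by simp)
    obtain ⟨c, hc, hle⟩ := h2 (v.2, (v.1, s)) hmem rfl
    have hcmin := pv_ofold_forward found s c hc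
    have hvc := hmin (c.2, (c.1, s)) hcmin.1 rfl
    rw [show pvKey (v.2, (v.1, s)) = toLex (v.1, v.2) from rfl,
      show pvKey (c.2, (c.1, s)) = toLex (c.1, c.2) from rfl, Prod.Lex.le_iff] at hvc
    simp only [ofLex_toLex] at hvc
    simp only [show ((v.2, (v.1, s)) : Int × (Int × String)).2.1 = v.1 from rfl,
      show ((v.2, (v.1, s)) : Int × (Int × String)).1 = v.2 from rfl] at hle
    have : c = v := by
      have h1 : c.1 = v.1 := by omega
      have h2 : c.2 = v.2 := by omega
      exact Prod.ext h1 h2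
    rw [hc, this]

lemma pv_fn_inj : Function.Injective
    (fun (e : Int × (Int × String)) => (e.2.2, (e.2.1, e.1))) := by
  intro a b h
  simp only [Prod.mk.injEq] at h
  exact Prod.ext h.2.2 (Prod.ext h.2.1 h.1)

lemma pv_R_pairwise (found : List (Int × String)) :
    ((pvSL found).filter (pvIsMin found)).Pairwise (fun a b => pvKey a < pvKey b) :=
  (pv_SL_pairwise found).filter _

lemma pv_mem_R_iff (found : List (Int × String)) (a : String × (Int × Int)) :
    a ∈ ((pvSL found).filter (pvIsMin found)).map (fun e => (e.2.2, (e.2.1, e.1)))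
      ↔ pvMinProp found a.1 a.2 := by
  rw [List.mem_map]
  constructor
  · rintro ⟨e, he, rfl⟩
    rw [List.mem_filter] at he
    obtain ⟨heSL, hmin⟩ := he
    have heE : e ∈ pvE found := (pv_SL_perm found).mem_iff.mp heSL
    rw [pv_isMin_iff] at hmin
    exact ⟨(show (e.1, (e.2.1, e.2.2)) = e from rfl) ▸ heE,
      fun e' he' hs' => (show (e.1, (e.2.1, e.2.2)) = e from rfl) ▸ hmin e' he' hs'⟩
  · rintro ⟨hmem, hmin⟩
    refine ⟨(a.2.2, (a.2.1, a.1)), ?_, by ext <;> rfl⟩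
    rw [List.mem_filter]
    constructor
    · exact (pv_SL_perm found).mem_iff.mpr hmem
    · rw [pv_isMin_iff]
      exact fun e' he' hs' => hmin e' he' hs'

lemma pv_sorted_items (found : List (Int × String)) :
    PySem.List.sorted2 ((pvE found).foldl pvDstep PySem.Dict.empty).items
        (fun kv => kv.2.1) (fun kv => kv.2.2)
      = ((pvSL found).filter (pvIsMin found)).map (fun e => (e.2.2, (e.2.1, e.1))) := by
  have hnodupk : ((pvE found).foldl pvDstep PySem.Dict.empty).keys.Nodup :=
    pv_nodup_fold _ _ PySem.Dict.nodup_keys_empty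
  have hnodupI : ((pvE found).foldl pvDstep PySem.Dict.empty).items.Nodup :=
    List.Nodup.of_map _ hnodupk
  have hnodupR : (((pvSL found).filter (pvIsMin found)).map
      (fun e => (e.2.2, (e.2.1, e.1)))).Nodup := by
    refine List.Nodup.map pv_fn_inj ?_
    exact (pv_R_pairwise found).imp (fun h => ne_of_apply_ne pvKey (ne_of_lt h))
  have hperm : (((pvSL found).filter (pvIsMin found)).map
      (fun e => (e.2.2, (e.2.1, e.1)))).Perm
      ((pvE found).foldl pvDstep PySem.Dict.empty).items := by
    rw [List.perm_ext_iff_of_nodup hnodupR hnodupI]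
    intro a
    rw [pv_mem_R_iff]
    rw [← PySem.Dict.get?_eq_some_iff_mem_items _ _ _ hnodupk, pv_final_char]
  rw [pv_sorted2_eq_sorted_lex]
  refine PySem.List.sorted_eq_of_perm_of_pairwise_lt _ _ _ hperm ?_
  rw [List.pairwise_map]
  exact pv_R_pairwise found

lemma pv_ded_filter (found : List (Int × String)) :
    ∀ (l pre : List (Int × (Int × String))) (seen : PySem.Set String),
      pvSL found = pre ++ l →
      (∀ t, t ∈ seen ↔ ∃ e' ∈ pre, e'.2.2 = t) →
      pvDed seen (l.map (fun e => e.2)) = (l.filter (pvIsMin found)).map (fun e => e.2) := by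
  intro l
  induction l with
  | nil => intro pre seen _ _; rfl
  | cons e t ih =>
    intro pre seen hsplit hseen
    have hpw := pv_SL_pairwise found
    rw [hsplit, List.pairwise_append] at hpw
    have hcross : ∀ a ∈ pre, pvKey a < pvKey e := fun a ha => hpw.2.2 a ha e (by simp)
    have hperm := pv_SL_perm found
    rw [hsplit] at hperm
    have hcontains : PySem.Set.contains seen e.2.2 = true ↔ e.2.2 ∈ seen := by
      simp [PySem.Set.contains]
    simp only [List.map_cons, pvDed, List.filter_cons]
    by_cases hm : e.2.2 ∈ seen
    · -- a same-period entry occurred earlier: not the minimum, skipped on both sides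
      obtain ⟨e', he', hs'⟩ := (hseen e.2.2).mp hm
      have hnotmin : ¬ (pvIsMin found e = true) := by
        rw [pv_isMin_iff]
        intro hcon
        have hE' : e' ∈ pvE found := hperm.mem_iff.mp (by simp [he'])
        exact absurd (hcon e' hE' hs') (not_le_of_gt (hcross e' he'))
      rw [if_pos (hcontains.mpr hm), Bool.eq_false_iff.mpr hnotmin]
      simp only [Bool.false_eq_true, if_false]
      refine ih (pre ++ [e]) seen (by rw [hsplit, List.append_assoc]; rfl) ?_
      intro t'
      constructor
      · intro h
        obtain ⟨a, ha, h'⟩ := (hseen t').mp h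
        exact ⟨a, by simp [ha], h'⟩
      · rintro ⟨a, ha, h'⟩
        rcases List.mem_append.mp ha with h'' | h''
        · exact (hseen t').mpr ⟨a, h'', h'⟩
        · simp at h''
          subst h''
          exact h' ▸ hm
    · -- first occurrence in sorted order: it is the per-period minimum, kept on both sides
      have hmin : pvIsMin found e = true := by
        rw [pv_isMin_iff]
        intro e'' he'' hs''
        have : e'' ∈ pre ++ e :: t := hperm.mem_iff.mpr he''
        rcases List.mem_append.mp this with h' | h'
        · exact absurd ((hseen e.2.2).mpr ⟨e'', h', hs''⟩) hm
        · rcases List.mem_cons.mp h' with rfl | h''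
          · exact le_refl _
          · exact le_of_lt ((List.pairwise_cons.mp hpw.2.1).1 e'' h'')
      rw [if_neg (fun hc => hm (hcontains.mp hc)), hmin]
      simp only [if_true, List.map_cons]
      congr 1
      refine ih (pre ++ [e]) (PySem.Set.add seen e.2.2)
        (by rw [hsplit, List.append_assoc]; rfl) ?_
      intro t'
      rw [PySem.Set.mem_add]
      constructor
      · rintro (h | rfl)
        · obtain ⟨a, ha, h'⟩ := (hseen t').mp h
          exact ⟨a, by simp [ha], h'⟩
        · exact ⟨e, by simp, rfl⟩
      · rintro ⟨a, ha, h'⟩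
        rcases List.mem_append.mp ha with h'' | h''
        · exact Or.inl ((hseen t').mpr ⟨a, h'', h'⟩)
        · simp at h''
          subst h''
          exact Or.inr h'.symm

lemma pv_A_eq_ded (found : List (Int × String)) :
    dedupe_periods_py found = pvDed [] (PySem.List.sorted found (fun x => x.1)) := by
  show (List.foldl _ ([], PySem.Set.empty) _).1 = _
  rw [pv_foldA]
  rfl

-- ===== VERDICT (by name: the statement is the Claim_ definition above) =====
theorem dedupe_periods_py_spec : Claim_equal_dedupe_periods_py := by
  intro found _
  show dedupe_periods_py found = dedupe_periods_py_alt found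
  have hA : dedupe_periods_py found
      = ((pvSL found).filter (pvIsMin found)).map (fun e => e.2) := by
    rw [pv_A_eq_ded, ← pv_stab]
    exact pv_ded_filter found (pvSL found) [] [] rfl (by simp)
  have hB : dedupe_periods_py_alt found
      = ((pvSL found).filter (pvIsMin found)).map (fun e => e.2) := by
    show (PySem.List.sorted2 ((pvE found).foldl pvDstep PySem.Dict.empty).items
        (fun kv => kv.2.1) (fun kv => kv.2.2)).map (fun kv => (kv.2.1, kv.1))
      = _
    rw [pv_sorted_items, List.map_map]
    rfl
  rw [hA, hB]
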